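-- pv_equiv track=rewrite | github.com/jeqcho/single-winner-generative-social-choice | src/sample_alt_voters/plot_epsilon_histogram_what_if.py | construct_101_preferences
-- ===== SOURCE A (Python) =====
-- from typing import List, Optional
--
-- def construct_101_preferences(
--     preferences: List[List[str]],
--     insertion_positions: List[int]
-- ) -> List[List[str]]:
--     """
--     Construct 101-alternative preference profile by inserting new statement.
--
--     Args:
--         preferences: Original 100x100 preference matrix [rank][voter]
--         insertion_positions: List of positions where "100" should be inserted for each voter
--
--     Returns:
--         New preference matrix with 101 alternatives [rank][voter]
--     """
--     n_ranks = len(preferences)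
--     n_voters = len(preferences[0]) if preferences else 0
--
--     # Convert to voter-centric format, insert "100", then convert back
--     voter_rankings = []
--     for voter_idx in range(n_voters):
--         ranking = [preferences[rank][voter_idx] for rank in range(n_ranks)]
--         voter_rankings.append(ranking)
--
--     # Insert "100" at specified position for each voter
--     for voter_idx, pos in enumerate(insertion_positions):
--         if pos is not None and voter_idx < len(voter_rankings):
--             pos = max(0, min(pos, len(voter_rankings[voter_idx])))
--             voter_rankings[voter_idx].insert(pos, "100")
--
--     # Convert back to [rank][voter] format
--     n_new_ranks = 101
--     new_preferences = []
--     for rank in range(n_new_ranks):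
--         rank_row = []
--         for voter_idx in range(n_voters):
--             if rank < len(voter_rankings[voter_idx]):
--                 rank_row.append(voter_rankings[voter_idx][rank])
--             else:
--                 rank_row.append("100")
--         new_preferences.append(rank_row)
--
--     return new_preferences
-- ===== SOURCE B (Python) =====
-- from typing import List, Optional
--
-- def construct_101_preferences(
--     preferences: List[List[str]],
--     insertion_positions: List[int]
-- ) -> List[List[str]]:
--     n_ranks = len(preferences)
--     n_voters = len(preferences[0]) if preferences else 0
--     # clamped insert position per voter (None = no insertion for that voter)
--     ps = []
--     for v in range(n_voters):
--         p = insertion_positions[v] if v < len(insertion_positions) else None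
--         ps.append(max(0, min(p, n_ranks)) if p is not None else None)
--     out = []
--     for rank in range(101):
--         row = []
--         for v in range(n_voters):
--             p = ps[v]
--             if p is None:
--                 row.append(preferences[rank][v] if rank < n_ranks else "100")
--             elif rank < p:
--                 row.append(preferences[rank][v])
--             elif rank == p:
--                 row.append("100")
--             elif rank <= n_ranks:
--                 row.append(preferences[rank - 1][v])
--             else:
--                 row.append("100")
--         out.append(row)
--     return out
-- ===== Notes on version B (the rewrite author's own statement) =====
-- stated objective: alternative
-- what changed: B drops A's transpose-to-voter-lists / list.insert / transpose-back pipeline and instead computes each output cell new_preferences[rank][voter] directly from the original matrix by index arithmetic around a per-voter clamped insert position.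
import Mathlib
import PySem

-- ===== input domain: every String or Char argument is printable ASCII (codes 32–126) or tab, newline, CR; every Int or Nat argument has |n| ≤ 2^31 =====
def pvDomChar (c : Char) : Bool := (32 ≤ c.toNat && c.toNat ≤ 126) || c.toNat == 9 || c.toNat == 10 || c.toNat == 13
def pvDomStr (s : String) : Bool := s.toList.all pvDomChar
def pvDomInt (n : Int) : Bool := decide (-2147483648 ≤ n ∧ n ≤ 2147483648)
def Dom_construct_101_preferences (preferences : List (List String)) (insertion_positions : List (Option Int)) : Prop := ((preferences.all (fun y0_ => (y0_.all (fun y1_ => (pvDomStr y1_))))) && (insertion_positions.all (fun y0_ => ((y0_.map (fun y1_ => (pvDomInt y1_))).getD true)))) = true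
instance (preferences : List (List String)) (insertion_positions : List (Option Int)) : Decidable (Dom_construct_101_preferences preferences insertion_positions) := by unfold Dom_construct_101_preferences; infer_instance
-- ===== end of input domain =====

-- B replaces A's transpose / list.insert / transpose-back pipeline by computing each output cell
-- new_preferences[rank][voter] directly with index arithmetic from a per-voter clamped insert position (objective: alternative).

-- ===== PORT A =====
-- A's first loop: voter_rankings, the voter-centric transpose of `preferences`
def pvVr0 (preferences : List (List String)) : List (List String) :=
  (List.range ((preferences.headD []).length)).map (fun (v : Nat) =>
    (List.range preferences.length).map (fun (r : Nat) =>
      PySem.List.pyGetD (PySem.List.pyGetD preferences (r : Int) []) (v : Int) ""))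

-- the body of A's second loop: one enumerate step (voter_idx, pos) mutating voter_rankings
def pvStepA (vr : List (List String)) (e : Int × Option Int) : List (List String) :=
  match e.2 with
  | none => vr
  | some p =>
    if e.1 < (vr.length : Int) then
      let row := PySem.List.pyGetD vr e.1 []
      PySem.List.pySetD vr e.1 (PySem.List.insert row (max 0 (min p (row.length : Int))) "100")
    else vr

def construct_101_preferences (preferences : List (List String)) (insertion_positions : List (Option Int)) : List (List String) :=
  let n_voters := (preferences.headD []).length  -- len(preferences[0]) if preferences else 0
  let voter_rankings := pvVr0 preferences
  let vr := (PySem.List.enumerate insertion_positions 0).foldl pvStepA voter_rankings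
  (List.range 101).map (fun (rank : Nat) =>
    (List.range n_voters).map (fun (v : Nat) =>
      let row := PySem.List.pyGetD vr (v : Int) []
      if rank < row.length then PySem.List.pyGetD row (rank : Int) "" else "100"))

-- ===== PORT B =====
def construct_101_preferences_alt (preferences : List (List String)) (insertion_positions : List (Option Int)) : List (List String) :=
  let n_ranks := preferences.length
  let n_voters := (preferences.headD []).length
  let ps : List (Option Nat) :=
    (List.range n_voters).map (fun v =>
      match (if v < insertion_positions.length then insertion_positions.getD v none else none) with
      | none => none
      | some p => some (max 0 (min p (n_ranks : Int))).toNat)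
  (List.range 101).map (fun rank =>
    (List.range n_voters).map (fun v =>
      match ps.getD v none with
      | none => if rank < n_ranks then (preferences.getD rank []).getD v "" else "100"
      | some p =>
        if rank < p then (preferences.getD rank []).getD v ""
        else if rank = p then "100"
        else if rank ≤ n_ranks then (preferences.getD (rank - 1) []).getD v ""
        else "100"))

-- ===== PRECONDITION & SPEC =====
-- Pre_ excludes exactly the ragged matrices on which Python A raises IndexError:
-- some row of `preferences` is shorter than the first row (rows there are indexed up to len(preferences[0])).
def Pre_construct_101_preferences (preferences : List (List String)) (insertion_positions : List (Option Int)) : Prop :=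
  ∀ row ∈ preferences, (preferences.headD []).length ≤ row.length
instance (preferences : List (List String)) (insertion_positions : List (Option Int)) : Decidable (Pre_construct_101_preferences preferences insertion_positions) := by unfold Pre_construct_101_preferences; infer_instance
def pvWitness_construct_101_preferences : List (List String) × List (Option Int) := ([["0", "1"], ["2", "3"]], [some 1, none])

def Spec_construct_101_preferences (preferences : List (List String)) (insertion_positions : List (Option Int)) (out : List (List String)) : Prop := out = construct_101_preferences_alt preferences insertion_positions
instance (preferences : List (List String)) (insertion_positions : List (Option Int)) (out : List (List String)) : Decidable (Spec_construct_101_preferences preferences insertion_positions out) := by unfold Spec_construct_101_preferences; infer_instance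

-- ===== CLAIM (what is proved, stated in full; the proofs are below) =====
def Claim_equal_construct_101_preferences : Prop := ∀ (preferences : List (List String)) (insertion_positions : List (Option Int)), Dom_construct_101_preferences preferences insertion_positions → Pre_construct_101_preferences preferences insertion_positions → Spec_construct_101_preferences preferences insertion_positions (construct_101_preferences preferences insertion_positions)

-- ===== LEMMAS AND PROOFS =====

-- the insertion A performs on one voter's ranking (clamped insert of "100")
def pvIns (row : List String) (p : Int) : List String :=
  PySem.List.insert row (max 0 (min p (row.length : Int))) "100"

theorem pvStepA_length (vr : List (List String)) (e : Int × Option Int) :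
    (pvStepA vr e).length = vr.length := by
  unfold pvStepA
  rcases e with ⟨i, _ | p⟩
  · rfl
  · simp only []
    split_ifs with h
    · simp [PySem.List.length_pySetD]
    · rfl

theorem pvStepA_getD_ne (vr : List (List String)) (k : Nat) (pos : Option Int) (i : Nat)
    (h : i ≠ k) : (pvStepA vr ((k : Int), pos)).getD i [] = vr.getD i [] := by
  unfold pvStepA
  rcases pos with _ | p
  · rfl
  · simp only []
    split_ifs with hk
    · simp [PySem.List.pySetD_natCast, List.getD, List.getElem?_set_ne (by omega : k ≠ i)]
    · rfl

theorem pvStepA_getD_self (vr : List (List String)) (k : Nat) (pos : Option Int)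
    (hk : k < vr.length) :
    (pvStepA vr ((k : Int), pos)).getD k [] =
      match pos with
      | none => vr.getD k []
      | some p => pvIns (vr.getD k []) p := by
  unfold pvStepA pvIns
  rcases pos with _ | p
  · rfl
  · simp only []
    rw [if_pos (by exact_mod_cast hk)]
    simp [PySem.List.pySetD_natCast, List.getD, hk,
      PySem.List.pyGetD_natCast]

theorem pvLoop_getD (ips : List (Option Int)) (k : Nat) (vr : List (List String)) (i : Nat)
    (hi : i < vr.length) :
    ((PySem.List.enumerate ips (k : Int)).foldl pvStepA vr).getD i [] =
      if k ≤ i then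
        match ips.getD (i - k) none with
        | none => vr.getD i []
        | some p => pvIns (vr.getD i []) p
      else vr.getD i [] := by
  induction ips generalizing k vr with
  | nil => simp [PySem.List.enumerate_nil]
  | cons pos rest ih =>
    rw [PySem.List.enumerate_cons]
    simp only [List.foldl_cons]
    have hcast : (k : Int) + 1 = ((k + 1 : Nat) : Int) := by push_cast; ring
    rw [hcast, ih (k + 1) (pvStepA vr ((k : Int), pos)) (by rw [pvStepA_length]; exact hi)]
    by_cases hik : i = k
    · subst hik
      rw [if_neg (by omega), pvStepA_getD_self vr i pos hi]
      rw [if_pos (by omega)]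
      simp
    · rw [pvStepA_getD_ne vr k pos i hik]
      by_cases hlt : i < k
      · rw [if_neg (by omega), if_neg (by omega)]
      · rw [if_pos (by omega), if_pos (by omega)]
        have : i - k = (i - (k + 1)) + 1 := by omega
        rw [this]
        simp

def pvCol (preferences : List (List String)) (v : Nat) : List String :=
  (List.range preferences.length).map (fun r => (preferences.getD r []).getD v "")

theorem pvCol_length (preferences : List (List String)) (v : Nat) :
    (pvCol preferences v).length = preferences.length := by simp [pvCol]

theorem pvCol_getD (preferences : List (List String)) (v rank : Nat)
    (h : rank < preferences.length) :
    (pvCol preferences v).getD rank "" = (preferences.getD rank []).getD v "" := by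
  simp [pvCol, List.getD_eq_getElem?_getD, h]

theorem pvVr0_length (preferences : List (List String)) :
    (pvVr0 preferences).length = (preferences.headD []).length := by simp [pvVr0]

theorem pvVr0_getD (preferences : List (List String)) (v : Nat)
    (hv : v < (preferences.headD []).length) :
    (pvVr0 preferences).getD v [] = pvCol preferences v := by
  unfold pvVr0 pvCol
  rw [List.getD_eq_getElem?_getD, List.getElem?_map, List.getElem?_range hv]
  simp

-- getD of a clamped insert, by index arithmetic
theorem pvGetD_insert_split (l : List String) (c rank : Nat) (hc : c ≤ l.length) :
    (l.take c ++ "100" :: l.drop c).getD rank "" =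
      if rank < c then l.getD rank ""
      else if rank = c then "100"
      else l.getD (rank - 1) "" := by
  have hlt : (l.take c).length = c := by simp; omega
  rcases Nat.lt_trichotomy rank c with h | h | h
  · rw [if_pos h, List.getD_eq_getElem?_getD, List.getD_eq_getElem?_getD,
      List.getElem?_append_left (by omega), List.getElem?_take_of_lt h]
  · subst h
    rw [if_neg (by omega), if_pos rfl, List.getD_eq_getElem?_getD,
      List.getElem?_append_right (by omega)]
    simp [hlt]
  · rw [if_neg (by omega), if_neg (by omega), List.getD_eq_getElem?_getD,
      List.getD_eq_getElem?_getD, List.getElem?_append_right (by omega)]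
    rw [hlt]
    have h2 : rank - c = (rank - c - 1) + 1 := by omega
    rw [h2, List.getElem?_cons_succ, List.getElem?_drop]
    have h3 : c + (rank - c - 1) = rank - 1 := by omega
    rw [h3]

theorem construct_101_preferences_spec' (preferences : List (List String))
    (insertion_positions : List (Option Int)) :
    construct_101_preferences preferences insertion_positions =
      construct_101_preferences_alt preferences insertion_positions := by
  unfold construct_101_preferences construct_101_preferences_alt
  refine List.map_congr_left fun rank hrank => ?_
  refine List.map_congr_left fun v hv => ?_
  have hv' : v < (preferences.headD []).length := List.mem_range.mp hv
  simp only [PySem.List.pyGetD_natCast]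
  -- the final voter ranking of voter v, by the loop characterisation
  have hkey : ((PySem.List.enumerate insertion_positions 0).foldl pvStepA
      (pvVr0 preferences)).getD v [] =
      match insertion_positions.getD v none with
      | none => pvCol preferences v
      | some p => pvIns (pvCol preferences v) p := by
    have h0 : ((0 : Nat) : Int) = (0 : Int) := rfl
    have := pvLoop_getD insertion_positions 0 (pvVr0 preferences) v
      (by rw [pvVr0_length]; exact hv')
    rw [h0] at this
    rw [this, if_pos (Nat.zero_le v), Nat.sub_zero, pvVr0_getD preferences v hv']
  rw [hkey]
  -- B's clamped position for voter v
  have hps : ((List.range ((preferences.headD []).length)).map (fun v =>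
      match (if v < insertion_positions.length then insertion_positions.getD v none else none) with
      | none => (none : Option Nat)
      | some p => some (max 0 (min p (preferences.length : Int))).toNat)).getD v none =
      match insertion_positions.getD v none with
      | none => (none : Option Nat)
      | some p => some (max 0 (min p (preferences.length : Int))).toNat := by
    have hif : (if v < insertion_positions.length then insertion_positions.getD v none else none)
        = insertion_positions.getD v none := by
      split_ifs with h
      · rfl
      · rw [List.getD_eq_getElem?_getD, List.getElem?_eq_none (by omega)]; rfl
    rw [List.getD_eq_getElem?_getD, List.getElem?_map, List.getElem?_range hv']
    simp only [Option.map_some, Option.getD_some]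
    rw [hif]
  rw [hps]
  cases hip : insertion_positions.getD v none with
  | none =>
    show (if rank < (pvCol preferences v).length then (pvCol preferences v).getD rank "" else "100")
        = (if rank < preferences.length then (preferences.getD rank []).getD v "" else "100")
    rw [pvCol_length]
    split_ifs with h
    · exact pvCol_getD preferences v rank h
    · rfl
  | some p =>
    show (if rank < (pvIns (pvCol preferences v) p).length
            then (pvIns (pvCol preferences v) p).getD rank "" else "100")
        = (if rank < (max 0 (min p (preferences.length : Int))).toNat
            then (preferences.getD rank []).getD v ""
          else if rank = (max 0 (min p (preferences.length : Int))).toNat then "100"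
          else if rank ≤ preferences.length then (preferences.getD (rank - 1) []).getD v ""
          else "100")
    have hnn : (0 : Int) ≤ max 0 (min p (preferences.length : Int)) := le_max_left _ _
    have hle : max 0 (min p (preferences.length : Int)) ≤ (preferences.length : Int) :=
      max_le (Int.natCast_nonneg _) (min_le_right _ _)
    set c : Nat := (max 0 (min p (preferences.length : Int))).toNat with hcdef
    have hc : c ≤ preferences.length := by omega
    have hcast : max 0 (min p (preferences.length : Int)) = (c : Int) :=
      (Int.toNat_of_nonneg hnn).symm
    have hins : pvIns (pvCol preferences v) p =
        (pvCol preferences v).take c ++ "100" :: (pvCol preferences v).drop c := by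
      rw [pvIns, pvCol_length, hcast,
        PySem.List.insert_natCast _ c _ (by rw [pvCol_length]; exact hc)]
    rw [hins]
    have hlen : ((pvCol preferences v).take c ++ "100" :: (pvCol preferences v).drop c).length
        = preferences.length + 1 := by
      simp [pvCol_length]
    rw [hlen]
    by_cases h1 : rank < preferences.length + 1
    · rw [if_pos h1, pvGetD_insert_split _ _ _ (by rw [pvCol_length]; exact hc)]
      split_ifs with h2 h3 h4
      · exact pvCol_getD preferences v rank (by omega)
      · rfl
      · exact pvCol_getD preferences v (rank - 1) (by omega)
      · omega
    · rw [if_neg h1, if_neg (by omega), if_neg (by omega), if_neg (by omega)]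

-- ===== VERDICT (by name: the statement is the Claim_ definition above) =====
theorem construct_101_preferences_spec : Claim_equal_construct_101_preferences := by
  intro preferences insertion_positions _ _
  exact construct_101_preferences_spec' preferences insertion_positions
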